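-- pv_equiv track=rewrite | github.com/MrBrantCode/unitest_baseline | mut_generate/mist_train_cf/cf_98835/solution.py | sum_of_negatives
-- ===== SOURCE A (Python) =====
-- def sum_of_negatives(arr):
--     if not arr:
--         return 0
--     else:
--         current_num = arr[0]
--         if current_num < 0:
--             return current_num + sum_of_negatives(arr[1:])
--         else:
--             return sum_of_negatives(arr[1:])
-- ===== SOURCE B (Python) =====
-- def sum_of_negatives(arr):
--     total = 0
--     for x in arr:
--         if x < 0:
--             total += x
--     return total
-- ===== Notes on version B (the rewrite author's own statement) =====
-- stated objective: faster
-- what changed: Replaced the recursive descent over arr[1:] (which copies a slice at every step) by a single iterative pass with an accumulator.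
import Mathlib
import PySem

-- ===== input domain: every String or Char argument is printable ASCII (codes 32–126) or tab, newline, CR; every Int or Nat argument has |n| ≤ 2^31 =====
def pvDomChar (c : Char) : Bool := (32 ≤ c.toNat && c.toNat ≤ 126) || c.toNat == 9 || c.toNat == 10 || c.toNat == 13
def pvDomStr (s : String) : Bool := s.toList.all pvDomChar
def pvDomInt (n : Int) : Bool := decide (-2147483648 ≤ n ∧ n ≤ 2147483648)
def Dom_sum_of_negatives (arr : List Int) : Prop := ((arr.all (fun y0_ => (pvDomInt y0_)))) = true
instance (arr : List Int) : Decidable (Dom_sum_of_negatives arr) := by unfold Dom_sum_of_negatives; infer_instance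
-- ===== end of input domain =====

-- B replaces A's recursion over arr[1:] by one iterative accumulator pass (simpler).

-- ===== PORT A =====
-- literal transliteration of A: empty check, head, recurse on the tail (arr[1:])
def sum_of_negatives (arr : List Int) : Int :=
  match arr with
  | [] => 0
  | current_num :: rest =>
    if current_num < 0 then current_num + sum_of_negatives rest
    else sum_of_negatives rest

-- ===== PORT B =====
-- literal transliteration of B: total = 0; for x in arr: if x < 0: total += x
def sum_of_negatives_alt (arr : List Int) : Int :=
  arr.foldl (fun total x => if x < 0 then total + x else total) 0

-- ===== PRECONDITION & SPEC =====
def Spec_sum_of_negatives (arr : List Int) (out : Int) : Prop := out = sum_of_negatives_alt arr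
instance (arr : List Int) (out : Int) : Decidable (Spec_sum_of_negatives arr out) := by unfold Spec_sum_of_negatives; infer_instance

-- ===== CLAIM (what is proved, stated in full; the proofs are below) =====
def Claim_equal_sum_of_negatives : Prop := ∀ (arr : List Int), Dom_sum_of_negatives arr → Spec_sum_of_negatives arr (sum_of_negatives arr)

-- ===== LEMMAS AND PROOFS =====
-- loop invariant: folding from accumulator t yields t + recursive sum
theorem foldl_neg_acc (arr : List Int) (t : Int) :
    arr.foldl (fun total x => if x < 0 then total + x else total) t
      = t + sum_of_negatives arr := by
  induction arr generalizing t with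
  | nil => simp [sum_of_negatives]
  | cons a l ih =>
    simp only [List.foldl, sum_of_negatives]
    split_ifs with h <;> rw [ih] <;> ring

-- ===== VERDICT (by name: the statement is the Claim_ definition above) =====
theorem sum_of_negatives_spec : Claim_equal_sum_of_negatives := by
  intro arr _
  unfold Spec_sum_of_negatives sum_of_negatives_alt
  rw [foldl_neg_acc]
  ring
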